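-- pv_equiv track=rewrite | github.com/introduction-to-python-for-medical/ps10-simulation-shira1-code | spread_fire.py | spread_fire
-- ===== SOURCE A (Python) =====
-- import copy
--
-- def spread_fire(grid):
--     """Update the forest grid based on fire spreading rules.
--
--     - 0: Empty cell
--     - 1: Tree
--     - 2: Burning tree
--     """
--     grid_size = len(grid)
--     update_grid = copy.deepcopy(grid)
--     for i in range(grid_size):
--         for j in range(grid_size):
--             if grid[i][j] == 1:
--                 neighbors = []
--                 # Check boundaries
--                 if i > 0:
--                     neighbors.append(grid[i-1][j])  # Top
--                 if i < grid_size - 1: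
--                     neighbors.append(grid[i+1][j])  # Bottom
--                 if j > 0:
--                     neighbors.append(grid[i][j-1])  # Left
--                 if j < grid_size - 1:
--                     neighbors.append(grid[i][j+1])  # Right
--                 # If any neighbor is burning, this tree catches fire
--                 if 2 in neighbors:
--                     update_grid[i][j] = 2
--     return update_grid
-- ===== SOURCE B (Python) =====
-- import copy
--
-- def spread_fire(grid):
--     n = len(grid)
--     out = copy.deepcopy(grid)
--     burning = [(i, j) for i in range(n) for j in range(n) if grid[i][j] == 2]
--     for i, j in burning:
--         for ni, nj in ((i - 1, j), (i + 1, j), (i, j - 1), (i, j + 1)):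
--             if 0 <= ni < n and 0 <= nj < n and grid[ni][nj] == 1:
--                 out[ni][nj] = 2
--     return out
-- ===== Notes on version B (the rewrite author's own statement) =====
-- stated objective: alternative
-- what changed: A scans every cell and, for each tree, builds a list of its neighbors' values and tests membership of 2; B gathers the burning cells in one pass and scatters fire from each burning cell to its in-bounds tree neighbors in the output copy.
import Mathlib
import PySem

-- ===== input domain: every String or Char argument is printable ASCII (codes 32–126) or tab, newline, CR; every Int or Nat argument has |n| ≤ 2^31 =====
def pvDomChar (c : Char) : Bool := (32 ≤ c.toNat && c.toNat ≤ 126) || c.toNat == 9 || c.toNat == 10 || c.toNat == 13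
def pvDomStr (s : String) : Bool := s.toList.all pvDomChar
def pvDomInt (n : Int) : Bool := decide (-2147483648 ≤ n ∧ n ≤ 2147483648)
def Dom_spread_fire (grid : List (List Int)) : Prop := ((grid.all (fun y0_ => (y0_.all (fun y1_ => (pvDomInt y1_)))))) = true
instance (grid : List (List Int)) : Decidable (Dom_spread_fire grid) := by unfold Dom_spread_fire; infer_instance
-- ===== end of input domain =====

-- One fire-spread step on a forest grid. B gathers the burning cells in one pass and scatters
-- fire from each to its in-bounds tree neighbours, instead of A's per-tree neighbour-list scan.

-- grid[i][j] for indices the loops keep in range (in-range per Pre_; Python would raise on a short row,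
-- those inputs are excluded by Pre_)
def pvCell (g : List (List Int)) (i j : Nat) : Int := (g.getD i []).getD j 0
-- update_grid[i][j] = 2 (exact for the in-range indices the ports use)
def pvSet2 (g : List (List Int)) (i j : Nat) : List (List Int) :=
  g.modify i (fun row => row.set j 2)

-- ===== PORT A =====
-- the `neighbors` list A builds for cell (i,j)
def pvNbrVals (g : List (List Int)) (n i j : Nat) : List Int :=
  ((if 0 < i then [pvCell g (i-1) j] else []) ++
   (if i < n - 1 then [pvCell g (i+1) j] else []) ++
   (if 0 < j then [pvCell g i (j-1)] else []) ++
   (if j < n - 1 then [pvCell g i (j+1)] else []))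

def spread_fire (grid : List (List Int)) : List (List Int) :=
  let n := grid.length
  (List.range n).foldl (fun ug i =>
    (List.range n).foldl (fun ug j =>
      if pvCell grid i j = 1 then
        (if (2:Int) ∈ pvNbrVals grid n i j then pvSet2 ug i j else ug)
      else ug) ug) grid

-- ===== PORT B =====
-- the four orthogonal neighbour positions of (i,j) that pass the 0 <= ni < n bound checks
def pvCands (n i j : Nat) : List (Nat × Nat) :=
  ((if 0 < i then [(i-1, j)] else []) ++
   (if i+1 < n then [(i+1, j)] else []) ++
   (if 0 < j then [(i, j-1)] else []) ++
   (if j+1 < n then [(i, j+1)] else []))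

def spread_fire_alt (grid : List (List Int)) : List (List Int) :=
  let n := grid.length
  let burning : List (Nat × Nat) :=
    (List.range n).flatMap (fun i =>
      ((List.range n).filter (fun j => pvCell grid i j == 2)).map (fun j => (i, j)))
  burning.foldl (fun out p =>
    (pvCands n p.1 p.2).foldl (fun out q =>
      if pvCell grid q.1 q.2 = 1 then pvSet2 out q.1 q.2 else out) out) grid

-- ===== PRECONDITION & SPEC =====
-- Pre_ excludes ragged grids with a row shorter than len(grid): A (and B) raise IndexError there.
def Pre_spread_fire (grid : List (List Int)) : Prop :=
  ∀ row ∈ grid, grid.length ≤ row.length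
instance (grid : List (List Int)) : Decidable (Pre_spread_fire grid) := by
  unfold Pre_spread_fire; infer_instance

def pvWitness_spread_fire : List (List Int) := [[1, 2], [0, 1]]

def Spec_spread_fire (grid : List (List Int)) (out : List (List Int)) : Prop := out = spread_fire_alt grid
instance (grid : List (List Int)) (out : List (List Int)) : Decidable (Spec_spread_fire grid out) := by unfold Spec_spread_fire; infer_instance

-- ===== CLAIM (what is proved, stated in full; the proofs are below) =====
def Claim_equal_spread_fire : Prop := ∀ (grid : List (List Int)), Dom_spread_fire grid → Pre_spread_fire grid → Spec_spread_fire grid (spread_fire grid)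

-- ===== LEMMAS AND PROOFS =====

-- the common update step, and the position lists both ports fold over
def pvStep (g : List (List Int)) (p : Nat × Nat) : List (List Int) := pvSet2 g p.1 p.2

def pvLA (grid : List (List Int)) : List (Nat × Nat) :=
  (List.range grid.length).flatMap (fun i =>
    ((List.range grid.length).filter (fun j =>
      decide (pvCell grid i j = 1 ∧ (2:Int) ∈ pvNbrVals grid grid.length i j))).map (fun j => (i, j)))

def pvLB (grid : List (List Int)) : List (Nat × Nat) :=
  ((List.range grid.length).flatMap (fun i =>
    ((List.range grid.length).filter (fun j => pvCell grid i j == 2)).map (fun j => (i, j)))).flatMap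
    (fun p => (pvCands grid.length p.1 p.2).filter (fun q => decide (pvCell grid q.1 q.2 = 1)))

lemma foldl_ite_filter {α β : Type} (p : α → Prop) [DecidablePred p] (f : β → α → β) :
    ∀ (l : List α) (g : β),
      l.foldl (fun g x => if p x then f g x else g) g = (l.filter (fun x => decide (p x))).foldl f g := by
  intro l
  induction l with
  | nil => intro g; rfl
  | cons x xs ih =>
    intro g
    by_cases h : p x <;> simp [h, ih]

lemma A_eq_fold (grid : List (List Int)) :
    spread_fire grid = (pvLA grid).foldl pvStep grid := by
  unfold spread_fire pvLA
  rw [List.foldl_flatMap]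
  have hfun : ∀ (acc : List (List Int)) (i : Nat),
      (List.range grid.length).foldl (fun ug j =>
        if pvCell grid i j = 1 then
          (if (2:Int) ∈ pvNbrVals grid grid.length i j then pvSet2 ug i j else ug)
        else ug) acc
      = (((List.range grid.length).filter (fun j =>
          decide (pvCell grid i j = 1 ∧ (2:Int) ∈ pvNbrVals grid grid.length i j))).map
          (fun j => (i, j))).foldl pvStep acc := by
    intro acc i
    rw [List.foldl_map,
      ← foldl_ite_filter (fun j => pvCell grid i j = 1 ∧ (2:Int) ∈ pvNbrVals grid grid.length i j)]
    have : (fun (g : List (List Int)) (j : Nat) =>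
        if pvCell grid i j = 1 then
          (if (2:Int) ∈ pvNbrVals grid grid.length i j then pvSet2 g i j else g)
        else g)
        = (fun g j => if pvCell grid i j = 1 ∧ (2:Int) ∈ pvNbrVals grid grid.length i j
            then pvStep g (i, j) else g) := by
      funext g j
      by_cases h1 : pvCell grid i j = 1 <;> by_cases h2 : (2:Int) ∈ pvNbrVals grid grid.length i j <;>
        simp [h1, h2, pvStep]
    rw [this]
  simp only [hfun]

lemma B_eq_fold (grid : List (List Int)) :
    spread_fire_alt grid = (pvLB grid).foldl pvStep grid := by
  unfold spread_fire_alt pvLB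
  rw [List.foldl_flatMap]
  have hfun : (fun (out : List (List Int)) (p : Nat × Nat) =>
      (pvCands grid.length p.1 p.2).foldl (fun out q =>
        if pvCell grid q.1 q.2 = 1 then pvSet2 out q.1 q.2 else out) out)
      = (fun acc p => ((pvCands grid.length p.1 p.2).filter (fun q =>
          decide (pvCell grid q.1 q.2 = 1))).foldl pvStep acc) := by
    funext acc p
    rw [← foldl_ite_filter (fun q : Nat × Nat => pvCell grid q.1 q.2 = 1) pvStep
      (pvCands grid.length p.1 p.2) acc]
    rfl
  rw [hfun, List.foldl_flatMap, List.foldl_flatMap]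

lemma row_set2 (g : List (List Int)) (i j a : Nat) :
    (pvSet2 g i j).getD a [] = if a = i then (g.getD a []).set j 2 else g.getD a [] := by
  unfold pvSet2
  by_cases h : a = i
  · subst h
    simp only [List.getD_eq_getElem?_getD, List.getElem?_modify]
    cases g[a]? <;> simp
  · have h' : i ≠ a := Ne.symm h
    simp only [h, if_false, List.getD_eq_getElem?_getD, List.getElem?_modify]
    cases g[a]? <;> simp [h']

lemma rowlen_set2 (g : List (List Int)) (i j a : Nat) :
    ((pvSet2 g i j).getD a []).length = (g.getD a []).length := by
  rw [row_set2]; split <;> simp_all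

lemma cell_set2 (g : List (List Int)) (i j a b : Nat)
    (hi : i < g.length) (hj : j < (g.getD i []).length) :
    pvCell (pvSet2 g i j) a b = if a = i ∧ b = j then 2 else pvCell g a b := by
  unfold pvCell
  rw [row_set2]
  by_cases ha : a = i
  · subst ha
    rw [if_pos rfl]
    by_cases hb : b = j
    · subst hb
      rw [List.getD_eq_getElem?_getD] at hj
      simp [List.getD_eq_getElem?_getD, hj]
    · have hb' : j ≠ b := Ne.symm hb
      simp [List.getD_eq_getElem?_getD, hb', hb]

  · simp [ha]

lemma len_foldSet (L : List (Nat × Nat)) :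
    ∀ (g : List (List Int)), (L.foldl pvStep g).length = g.length := by
  induction L with
  | nil => intro g; rfl
  | cons p L ih => intro g; simp [List.foldl_cons, ih, pvStep, pvSet2, List.length_modify]

lemma rowlen_foldSet (L : List (Nat × Nat)) :
    ∀ (g : List (List Int)) (a : Nat),
      ((L.foldl pvStep g).getD a []).length = (g.getD a []).length := by
  induction L with
  | nil => intro g a; rfl
  | cons p L ih => intro g a; rw [List.foldl_cons, ih, pvStep, rowlen_set2]

lemma cell_foldSet (L : List (Nat × Nat)) :
    ∀ (g : List (List Int)),
      (∀ p ∈ L, p.1 < g.length ∧ p.2 < (g.getD p.1 []).length) →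
      ∀ a b, pvCell (L.foldl pvStep g) a b = if (a, b) ∈ L then 2 else pvCell g a b := by
  induction L with
  | nil => intro g _ a b; simp
  | cons p L ih =>
    intro g hb a b
    obtain ⟨h1, h2⟩ := hb p (List.mem_cons_self)
    rw [List.foldl_cons]
    have hb' : ∀ q ∈ L, q.1 < (pvStep g p).length ∧ q.2 < ((pvStep g p).getD q.1 []).length := by
      intro q hq
      have := hb q (List.mem_cons_of_mem _ hq)
      refine ⟨?_, ?_⟩
      · simpa [pvStep, pvSet2, List.length_modify] using this.1
      · rw [show (pvStep g p : List (List Int)) = pvSet2 g p.1 p.2 from rfl, rowlen_set2]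
        exact this.2
    rw [ih (pvStep g p) hb' a b]
    by_cases hmem : (a, b) ∈ L
    · simp [hmem]
    · have : pvCell (pvStep g p) a b = if a = p.1 ∧ b = p.2 then 2 else pvCell g a b :=
        cell_set2 g p.1 p.2 a b h1 h2
      simp only [hmem, if_false, this, List.mem_cons]
      by_cases hap : a = p.1 ∧ b = p.2
      · have hp : (a, b) = p := by obtain ⟨u, v⟩ := hap; cases p; simp_all
        simp [hap.1, hap.2]
      · have hp : ¬ (a, b) = p := by
          intro h; cases p; apply hap; constructor <;> simp_all
        simp [hap, hp]

lemma mem_nbr (g : List (List Int)) (n i j : Nat) :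
    (2:Int) ∈ pvNbrVals g n i j ↔
      (0 < i ∧ pvCell g (i-1) j = 2) ∨ (i < n - 1 ∧ pvCell g (i+1) j = 2) ∨
      (0 < j ∧ pvCell g i (j-1) = 2) ∨ (j < n - 1 ∧ pvCell g i (j+1) = 2) := by
  simp [pvNbrVals, List.mem_append, List.mem_ite_nil_right, eq_comm]

lemma mem_cands (n i j a b : Nat) :
    (a, b) ∈ pvCands n i j ↔
      (0 < i ∧ a = i-1 ∧ b = j) ∨ (i+1 < n ∧ a = i+1 ∧ b = j) ∨
      (0 < j ∧ a = i ∧ b = j-1) ∨ (j+1 < n ∧ a = i ∧ b = j+1) := by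
  simp [pvCands, List.mem_append, List.mem_ite_nil_right, Prod.ext_iff]

lemma mem_LA (grid : List (List Int)) (a b : Nat) :
    (a, b) ∈ pvLA grid ↔
      a < grid.length ∧ b < grid.length ∧ pvCell grid a b = 1 ∧
        (2:Int) ∈ pvNbrVals grid grid.length a b := by
  unfold pvLA
  simp only [List.mem_flatMap, List.mem_map, List.mem_filter, List.mem_range, decide_eq_true_eq]
  constructor
  · rintro ⟨i, hi, j, ⟨⟨hj, hc⟩, hab⟩⟩
    obtain ⟨rfl, rfl⟩ := Prod.mk.injEq .. ▸ hab
    simp_all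
  · rintro ⟨ha, hb, hc, hn⟩
    exact ⟨a, ha, b, ⟨⟨hb, hc, hn⟩, rfl⟩⟩

lemma mem_LB (grid : List (List Int)) (a b : Nat) :
    (a, b) ∈ pvLB grid ↔
      ∃ i j, i < grid.length ∧ j < grid.length ∧ pvCell grid i j = 2 ∧
        (a, b) ∈ pvCands grid.length i j ∧ pvCell grid a b = 1 := by
  unfold pvLB
  simp only [List.mem_flatMap, List.mem_map, List.mem_filter, List.mem_range, decide_eq_true_eq,
    beq_iff_eq]
  constructor
  · rintro ⟨p, ⟨i, hi, j, ⟨⟨hj, h2⟩, rfl⟩⟩, hmem, h1⟩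
    exact ⟨i, j, hi, hj, h2, hmem, h1⟩
  · rintro ⟨i, j, hi, hj, h2, hmem, h1⟩
    exact ⟨(i, j), ⟨i, hi, j, ⟨⟨hj, h2⟩, rfl⟩⟩, hmem, h1⟩

lemma mem_LA_iff_LB (grid : List (List Int)) (a b : Nat) :
    (a, b) ∈ pvLA grid ↔ (a, b) ∈ pvLB grid := by
  rw [mem_LA, mem_LB]
  constructor
  · rintro ⟨ha, hb, h1, hn⟩
    rw [mem_nbr] at hn
    rcases hn with ⟨hp, h2⟩ | ⟨hp, h2⟩ | ⟨hp, h2⟩ | ⟨hp, h2⟩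
    · exact ⟨a-1, b, by omega, hb, h2, by rw [mem_cands]; right; left; exact ⟨by omega, by omega, rfl⟩, h1⟩
    · exact ⟨a+1, b, by omega, hb, h2, by rw [mem_cands]; left; exact ⟨by omega, by omega, rfl⟩, h1⟩
    · exact ⟨a, b-1, ha, by omega, h2, by rw [mem_cands]; right; right; right; exact ⟨by omega, rfl, by omega⟩, h1⟩
    · exact ⟨a, b+1, ha, by omega, h2, by rw [mem_cands]; right; right; left; exact ⟨by omega, rfl, by omega⟩, h1⟩
  · rintro ⟨i, j, hi, hj, h2, hmem, h1⟩
    rw [mem_cands] at hmem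
    rcases hmem with ⟨hp, rfl, rfl⟩ | ⟨hp, rfl, rfl⟩ | ⟨hp, rfl, rfl⟩ | ⟨hp, rfl, rfl⟩
    · refine ⟨by omega, hj, h1, ?_⟩
      rw [mem_nbr]; right; left
      refine ⟨by omega, ?_⟩
      have h : i - 1 + 1 = i := by omega
      rw [h]; exact h2
    · refine ⟨by omega, hj, h1, ?_⟩
      rw [mem_nbr]; left
      refine ⟨by omega, ?_⟩
      have h : i + 1 - 1 = i := by omega
      rw [h]; exact h2
    · refine ⟨hi, by omega, h1, ?_⟩
      rw [mem_nbr]; right; right; right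
      refine ⟨by omega, ?_⟩
      have h : j - 1 + 1 = j := by omega
      rw [h]; exact h2
    · refine ⟨hi, by omega, h1, ?_⟩
      rw [mem_nbr]; right; right; left
      refine ⟨by omega, ?_⟩
      have h : j + 1 - 1 = j := by omega
      rw [h]; exact h2

lemma bounds_of_mem (grid : List (List Int)) (hpre : Pre_spread_fire grid) :
    ∀ L : List (Nat × Nat), (∀ p ∈ L, p.1 < grid.length ∧ p.2 < grid.length) →
      ∀ p ∈ L, p.1 < grid.length ∧ p.2 < (grid.getD p.1 []).length := by
  intro L hL p hp
  obtain ⟨h1, h2⟩ := hL p hp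
  refine ⟨h1, lt_of_lt_of_le h2 ?_⟩
  apply hpre
  rw [List.getD_eq_getElem (l := grid) (d := []) h1]
  exact List.getElem_mem h1

lemma grids_ext (g1 g2 : List (List Int))
    (hlen : g1.length = g2.length)
    (hrow : ∀ a, (g1.getD a []).length = (g2.getD a []).length)
    (hcell : ∀ a b, pvCell g1 a b = pvCell g2 a b) : g1 = g2 := by
  apply List.ext_getElem hlen
  intro a h1 h2
  apply List.ext_getElem
  · have := hrow a
    rwa [List.getD_eq_getElem (l := g1) (d := []) h1,
         List.getD_eq_getElem (l := g2) (d := []) h2] at this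
  · intro b hb1 hb2
    have := hcell a b
    unfold pvCell at this
    rwa [List.getD_eq_getElem (l := g1) (d := []) h1,
         List.getD_eq_getElem (l := g2) (d := []) h2,
         List.getD_eq_getElem _ _ hb1, List.getD_eq_getElem _ _ hb2] at this

-- ===== VERDICT (by name: the statement is the Claim_ definition above) =====
theorem spread_fire_spec : Claim_equal_spread_fire := by
  intro grid _ hpre
  unfold Spec_spread_fire
  rw [A_eq_fold, B_eq_fold]
  have hLAb : ∀ p ∈ pvLA grid, p.1 < grid.length ∧ p.2 < grid.length := by
    rintro ⟨a, b⟩ hp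
    have := (mem_LA grid a b).mp hp
    exact ⟨this.1, this.2.1⟩
  have hLBb : ∀ p ∈ pvLB grid, p.1 < grid.length ∧ p.2 < grid.length := by
    rintro ⟨a, b⟩ hp
    have := (mem_LA_iff_LB grid a b).mpr hp
    have := (mem_LA grid a b).mp this
    exact ⟨this.1, this.2.1⟩
  have hA := bounds_of_mem grid hpre (pvLA grid) hLAb
  have hB := bounds_of_mem grid hpre (pvLB grid) hLBb
  apply grids_ext
  · rw [len_foldSet, len_foldSet]
  · intro a; rw [rowlen_foldSet, rowlen_foldSet]
  · intro a b
    rw [cell_foldSet (pvLA grid) grid hA a b, cell_foldSet (pvLB grid) grid hB a b]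
    by_cases h : (a, b) ∈ pvLA grid
    · simp [h, (mem_LA_iff_LB grid a b).mp h]
    · have h2 : (a, b) ∉ pvLB grid := fun hh => h ((mem_LA_iff_LB grid a b).mpr hh)
      simp [h, h2]
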